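-- pv_equiv track=rewrite | github.com/tlhpaul/Python-Project | Squarelotron/Squarelotron.py | main_diagonal_flip
-- ===== SOURCE A (Python) =====
-- import copy
--
-- def main_diagonal_flip(squarelotron, ring):
--     """This function performs the Main Diagonal Flip of the squarelotron, as described above, and returns
--     the new squarelotron. The original squarelotron should not be modified (I will check for this).
--     Calling this function should not result in any input/output."""
--     new_squarelotron = copy.deepcopy(squarelotron)
--     if ring == "outer":
--         for i in range(1, 5):
--             new_squarelotron[i][0], new_squarelotron[0][i] = new_squarelotron[0][i], new_squarelotron[i][0]
--         for j in range(1, 4):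
--             new_squarelotron[j][4], new_squarelotron[4][j] = new_squarelotron[4][j], new_squarelotron[j][4]
--
--     elif ring == "inner":
--         for i in range(2, 4):
--             new_squarelotron[1][i], new_squarelotron[i][1] = new_squarelotron[i][1], new_squarelotron[1][i]
--         new_squarelotron[2][3], new_squarelotron[3][2] = new_squarelotron[3][2], new_squarelotron[2][3]
--
--     return new_squarelotron
-- ===== SOURCE B (Python) =====
-- # B: main-diagonal flip as a restricted transpose: one comprehension reading from the
-- # original grid, instead of A's sequence of in-place pair swaps on a deepcopy.
-- OUTER_CELLS = {(r, c) for r in range(5) for c in range(5)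
--                if r != c and (r in (0, 4) or c in (0, 4))}
-- INNER_CELLS = {(1, 2), (2, 1), (1, 3), (3, 1), (2, 3), (3, 2)}
--
-- def main_diagonal_flip(squarelotron, ring):
--     cells = OUTER_CELLS if ring == "outer" else INNER_CELLS if ring == "inner" else set()
--     return [[squarelotron[c][r] if (r, c) in cells else v
--              for c, v in enumerate(row)]
--             for r, row in enumerate(squarelotron)]
-- ===== Notes on version B (the rewrite author's own statement) =====
-- stated objective: alternative
-- what changed: B computes the flip as a transpose restricted to a precomputed set of ring cells, rebuilding the grid in one enumerate-comprehension that reads from the original, instead of A's deepcopy followed by a sequence of in-place pair swaps.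
import Mathlib
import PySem

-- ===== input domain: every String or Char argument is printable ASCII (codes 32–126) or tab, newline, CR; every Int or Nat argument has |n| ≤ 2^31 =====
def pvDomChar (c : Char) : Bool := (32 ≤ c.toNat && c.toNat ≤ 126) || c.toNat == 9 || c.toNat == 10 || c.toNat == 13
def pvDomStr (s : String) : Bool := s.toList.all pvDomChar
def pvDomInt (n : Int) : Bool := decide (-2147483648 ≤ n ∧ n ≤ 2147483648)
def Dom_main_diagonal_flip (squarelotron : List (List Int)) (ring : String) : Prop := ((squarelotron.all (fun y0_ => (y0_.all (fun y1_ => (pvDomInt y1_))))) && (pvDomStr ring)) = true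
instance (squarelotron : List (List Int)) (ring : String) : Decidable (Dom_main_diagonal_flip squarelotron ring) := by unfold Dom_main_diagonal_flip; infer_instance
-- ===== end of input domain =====

-- B rebuilds the grid in one pass as a transpose restricted to the ring's cell set,
-- instead of A's sequence of in-place pair swaps on a deepcopy (alternative decomposition).
-- A does not mutate its argument (it works on a deepcopy), so return-value equality is full equality.

-- ===== PORT A =====
-- Python tuple swap `new[i][j], new[k][l] = new[k][l], new[i][j]`: read both, then assign left to right.
def pvSwap (g : List (List Int)) (i j k l : Nat) : List (List Int) :=
  let a := (g.getD i []).getD j 0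
  let b := (g.getD k []).getD l 0
  let g1 := g.set i ((g.getD i []).set j b)
  g1.set k ((g1.getD k []).set l a)

def main_diagonal_flip (squarelotron : List (List Int)) (ring : String) : List (List Int) :=
  -- deepcopy is the identity on an immutable List (List Int)
  if ring = "outer" then
    let n := [1, 2, 3, 4].foldl (fun g i => pvSwap g i 0 0 i) squarelotron
    [1, 2, 3].foldl (fun g j => pvSwap g j 4 4 j) n
  else if ring = "inner" then
    let n := [2, 3].foldl (fun g i => pvSwap g 1 i i 1) squarelotron
    pvSwap n 2 3 3 2
  else squarelotron

-- ===== PORT B =====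
def pvCells (ring : String) : List (Int × Int) :=
  if ring = "outer" then
    [(0,1),(0,2),(0,3),(0,4),(1,0),(2,0),(3,0),(4,0),(1,4),(2,4),(3,4),(4,1),(4,2),(4,3)]
  else if ring = "inner" then [(1,2),(2,1),(1,3),(3,1),(2,3),(3,2)]
  else []

def main_diagonal_flip_alt (squarelotron : List (List Int)) (ring : String) : List (List Int) :=
  let cells := pvCells ring
  (PySem.List.enumerate squarelotron 0).map (fun p =>
    (PySem.List.enumerate p.2 0).map (fun q =>
      if cells.contains (p.1, q.1) then
        -- enumerate indices are nonnegative, so .toNat is exact here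
        (squarelotron.getD q.1.toNat []).getD p.1.toNat 0
      else q.2))

-- ===== PRECONDITION & SPEC =====
def rlen (g : List (List Int)) (r : Nat) : Nat := (g.getD r []).length

-- Pre_ is exactly where A returns: on smaller grids the ring accesses raise IndexError.
def Pre_main_diagonal_flip (squarelotron : List (List Int)) (ring : String) : Prop :=
  (ring = "outer" → 5 ≤ squarelotron.length ∧ 5 ≤ rlen squarelotron 0 ∧ 5 ≤ rlen squarelotron 1 ∧
      5 ≤ rlen squarelotron 2 ∧ 5 ≤ rlen squarelotron 3 ∧ 4 ≤ rlen squarelotron 4) ∧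
  (ring = "inner" → 4 ≤ squarelotron.length ∧ 4 ≤ rlen squarelotron 1 ∧
      4 ≤ rlen squarelotron 2 ∧ 3 ≤ rlen squarelotron 3)
instance (squarelotron : List (List Int)) (ring : String) : Decidable (Pre_main_diagonal_flip squarelotron ring) := by unfold Pre_main_diagonal_flip; infer_instance

def pvWitness_main_diagonal_flip : List (List Int) × String :=
  ([[1,2,3,4,5],[6,7,8,9,10],[11,12,13,14,15],[16,17,18,19,20],[21,22,23,24,25]], "outer")

def Spec_main_diagonal_flip (squarelotron : List (List Int)) (ring : String) (out : List (List Int)) : Prop := out = main_diagonal_flip_alt squarelotron ring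
instance (squarelotron : List (List Int)) (ring : String) (out : List (List Int)) : Decidable (Spec_main_diagonal_flip squarelotron ring out) := by unfold Spec_main_diagonal_flip; infer_instance

-- ===== CLAIM (what is proved, stated in full; the proofs are below) =====
def Claim_equal_main_diagonal_flip : Prop := ∀ (squarelotron : List (List Int)) (ring : String), Dom_main_diagonal_flip squarelotron ring → Pre_main_diagonal_flip squarelotron ring → Spec_main_diagonal_flip squarelotron ring (main_diagonal_flip squarelotron ring)

-- ===== LEMMAS AND PROOFS =====
def gget (g : List (List Int)) (r c : Nat) : Int := (g.getD r []).getD c 0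

def pvApply (L : List (Nat × Nat)) (g : List (List Int)) : List (List Int) :=
  L.foldl (fun g p => pvSwap g p.1 p.2 p.2 p.1) g

def cellsOf (L : List (Nat × Nat)) : List (Nat × Nat) :=
  L.flatMap (fun p => [(p.1, p.2), (p.2, p.1)])

lemma getD_set' {α : Type} (l : List α) (i n : Nat) (a d : α) :
    (l.set i a).getD n d = if i = n ∧ i < l.length then a else l.getD n d := by
  rw [List.getD_eq_getElem?_getD, List.getElem?_set, List.getD_eq_getElem?_getD]
  split_ifs <;> simp_all; omega

lemma rlen_setRow (g : List (List Int)) (i j : Nat) (v : Int) (r : Nat) :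
    rlen (g.set i ((g.getD i []).set j v)) r = rlen g r := by
  unfold rlen; rw [getD_set']; split_ifs with h <;> simp_all

lemma gget_setRow (g : List (List Int)) (i j : Nat) (v : Int) (r c : Nat)
    (h1 : i < g.length) (h2 : j < rlen g i) :
    gget (g.set i ((g.getD i []).set j v)) r c = if r = i ∧ c = j then v else gget g r c := by
  unfold gget rlen at *
  rw [getD_set']
  split_ifs with ha hb hb <;> try rfl
  · obtain ⟨rfl, -⟩ := ha
    rw [getD_set']
    obtain ⟨-, rfl⟩ := hb
    simp_all
  · obtain ⟨rfl, -⟩ := ha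
    rw [getD_set']
    split_ifs with hc
    · exact absurd ⟨rfl, hc.1.symm⟩ hb
    · rfl
  · exact absurd ⟨hb.1.symm, h1⟩ ha

lemma length_pvSwap (g : List (List Int)) (i j k l : Nat) :
    (pvSwap g i j k l).length = g.length := by simp [pvSwap]

lemma rlen_pvSwap (g : List (List Int)) (i j k l r : Nat) :
    rlen (pvSwap g i j k l) r = rlen g r := by
  show rlen ((g.set i ((g.getD i []).set j ((g.getD k []).getD l 0))).set k _) r = _
  rw [rlen_setRow, rlen_setRow]

lemma gget_pvSwap (g : List (List Int)) (i j k l r c : Nat)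
    (h1 : i < g.length) (h2 : j < rlen g i) (h3 : k < g.length) (h4 : l < rlen g k) :
    gget (pvSwap g i j k l) r c =
      if r = k ∧ c = l then gget g i j
      else if r = i ∧ c = j then gget g k l
      else gget g r c := by
  show gget ((g.set i ((g.getD i []).set j ((g.getD k []).getD l 0))).set k
      (((g.set i ((g.getD i []).set j ((g.getD k []).getD l 0))).getD k []).set l
        ((g.getD i []).getD j 0))) r c = _
  rw [gget_setRow _ k l _ r c (by simpa using h3) (by rw [rlen_setRow]; exact h4),
      gget_setRow _ i j _ r c h1 h2]
  rfl

lemma length_pvApply (L : List (Nat × Nat)) (g : List (List Int)) :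
    (pvApply L g).length = g.length := by
  induction L generalizing g with
  | nil => rfl
  | cons p L ih => rw [pvApply, List.foldl_cons, ← pvApply, ih, length_pvSwap]

lemma rlen_pvApply (L : List (Nat × Nat)) (g : List (List Int)) (r : Nat) :
    rlen (pvApply L g) r = rlen g r := by
  induction L generalizing g with
  | nil => rfl
  | cons p L ih => rw [pvApply, List.foldl_cons, ← pvApply, ih, rlen_pvSwap]

lemma gget_pvApply (L : List (Nat × Nat)) (g : List (List Int))
    (hb : ∀ p ∈ L, p.1 < g.length ∧ p.2 < rlen g p.1 ∧ p.2 < g.length ∧ p.1 < rlen g p.2)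
    (hn : (cellsOf L).Nodup) (r c : Nat) :
    gget (pvApply L g) r c = if (r, c) ∈ cellsOf L then gget g c r else gget g r c := by
  induction L generalizing g with
  | nil => simp [pvApply, cellsOf]
  | cons p L ih =>
    obtain ⟨hp1, hp2, hp3, hp4⟩ := hb p (List.mem_cons_self ..)
    have hcells : cellsOf (p :: L) = (p.1, p.2) :: (p.2, p.1) :: cellsOf L := rfl
    rw [hcells] at hn ⊢
    rw [List.nodup_cons, List.nodup_cons] at hn
    obtain ⟨ha1, hn2, hn'⟩ := hn
    have hn1 : (p.1, p.2) ∉ cellsOf L := fun h => ha1 (List.mem_cons_of_mem _ h)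
    rw [pvApply, List.foldl_cons, ← pvApply]
    rw [ih _ (fun q hq => by
        have := hb q (List.mem_cons_of_mem _ hq)
        simpa [length_pvSwap, rlen_pvSwap] using this) hn']
    have hsw := fun x y => gget_pvSwap g p.1 p.2 p.2 p.1 x y hp1 hp2 hp3 hp4
    by_cases hm : (r, c) ∈ cellsOf L
    · have hm' : (c, r) ∈ cellsOf L := by
        unfold cellsOf at hm ⊢
        simp only [List.mem_flatMap, List.mem_cons,
          List.not_mem_nil, or_false, Prod.mk.injEq] at hm ⊢
        obtain ⟨q, hq, hq2⟩ := hm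
        exact ⟨q, hq, by tauto⟩
      rw [if_pos hm, hsw c r, if_neg, if_neg]
      · rw [if_pos (List.mem_cons_of_mem _ (List.mem_cons_of_mem _ hm))]
      · rintro ⟨rfl, rfl⟩; exact hn1 hm'
      · rintro ⟨rfl, rfl⟩; exact hn2 hm'
    · rw [if_neg hm, hsw r c]
      by_cases h1 : r = p.2 ∧ c = p.1
      · obtain ⟨rfl, rfl⟩ := h1
        rw [if_pos ⟨rfl, rfl⟩, if_pos (by simp)]
      · rw [if_neg h1]
        by_cases h2 : r = p.1 ∧ c = p.2
        · obtain ⟨rfl, rfl⟩ := h2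
          rw [if_pos ⟨rfl, rfl⟩, if_pos (by simp)]
        · rw [if_neg h2, if_neg]
          simp only [List.mem_cons, Prod.mk.injEq, not_or]
          exact ⟨h2, h1, hm⟩

lemma length_alt (s : List (List Int)) (ring : String) :
    (main_diagonal_flip_alt s ring).length = s.length := by
  simp [main_diagonal_flip_alt, PySem.List.length_enumerate]

lemma rlen_alt (s : List (List Int)) (ring : String) (r : Nat) :
    rlen (main_diagonal_flip_alt s ring) r = rlen s r := by
  unfold rlen main_diagonal_flip_alt
  by_cases h : r < s.length
  · rw [List.getD_eq_getElem?_getD, List.getD_eq_getElem?_getD]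
    rw [List.getElem?_map, PySem.List.getElem?_enumerate]
    rw [List.getElem?_eq_getElem h]
    simp [PySem.List.length_enumerate]
  · rw [List.getD_eq_default _ _ (by simpa [PySem.List.length_enumerate] using h),
      List.getD_eq_default _ _ (by omega)]

lemma gget_alt (s : List (List Int)) (ring : String) (r c : Nat) :
    gget (main_diagonal_flip_alt s ring) r c =
      if (pvCells ring).contains ((r : Int), (c : Int)) ∧ r < s.length ∧ c < rlen s r
      then gget s c r else gget s r c := by
  unfold gget
  by_cases hr : r < s.length
  · have hgd : s.getD r [] = s[r] := List.getD_eq_getElem s [] hr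
    have hrow : (main_diagonal_flip_alt s ring).getD r [] =
        (PySem.List.enumerate (s[r]) 0).map (fun q =>
          if (pvCells ring).contains ((r : Int), q.1) then
            (s.getD q.1.toNat []).getD r 0 else q.2) := by
      unfold main_diagonal_flip_alt
      rw [List.getD_eq_getElem?_getD, List.getElem?_map, PySem.List.getElem?_enumerate,
        List.getElem?_eq_getElem hr]
      simp
    rw [hrow]
    by_cases hc : c < (s[r]).length
    · rw [List.getD_eq_getElem?_getD, List.getElem?_map, PySem.List.getElem?_enumerate,
        List.getElem?_eq_getElem hc]
      simp only [Option.map_some, Option.getD_some, zero_add, Int.toNat_natCast]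
      by_cases hb : (pvCells ring).contains ((r : Int), (c : Int)) = true
      · rw [if_pos hb, if_pos ⟨hb, hr, by rwa [rlen, hgd]⟩]
      · rw [if_neg hb, if_neg (by rw [not_and_or]; exact Or.inl hb), hgd,
          List.getD_eq_getElem _ _ hc]
    · rw [List.getD_eq_default _ _ (by simpa [PySem.List.length_enumerate] using hc),
        if_neg (by rw [rlen, hgd]; exact fun h => hc h.2.2), hgd,
        List.getD_eq_default _ _ (by omega)]
  · rw [show (main_diagonal_flip_alt s ring).getD r [] = ([] : List Int) from
        List.getD_eq_default _ _ (by rw [length_alt]; omega),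
      show s.getD r [] = ([] : List Int) from List.getD_eq_default _ _ (by omega),
      if_neg (fun h => hr h.2.1)]

lemma list2_ext (a b : List (List Int)) (hl : a.length = b.length)
    (hr : ∀ r, rlen a r = rlen b r) (he : ∀ r c, gget a r c = gget b r c) : a = b := by
  apply List.ext_getElem hl
  intro r h1 h2
  apply List.ext_getElem
  · have := hr r
    rwa [rlen, rlen, List.getD_eq_getElem _ _ h1, List.getD_eq_getElem _ _ h2] at this
  · intro c hc1 hc2
    have := he r c
    rwa [gget, gget, List.getD_eq_getElem _ _ h1, List.getD_eq_getElem _ _ h2,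
      List.getD_eq_getElem _ _ hc1, List.getD_eq_getElem _ _ hc2] at this

-- ===== VERDICT (by name: the statement is the Claim_ definition above) =====
theorem main_diagonal_flip_spec : Claim_equal_main_diagonal_flip := by
  intro s ring _hdom hpre
  unfold Spec_main_diagonal_flip
  by_cases ho : ring = "outer"
  · subst ho
    obtain ⟨h5, hr0, hr1, hr2, hr3, hr4⟩ := hpre.1 rfl
    have hA : main_diagonal_flip s "outer" =
        pvApply [(1,0),(2,0),(3,0),(4,0),(1,4),(2,4),(3,4)] s := by
      simp [main_diagonal_flip, pvApply, List.foldl]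
    have hb : ∀ p ∈ ([(1,0),(2,0),(3,0),(4,0),(1,4),(2,4),(3,4)] : List (Nat × Nat)),
        p.1 < s.length ∧ p.2 < rlen s p.1 ∧ p.2 < s.length ∧ p.1 < rlen s p.2 := by
      intro p hp
      fin_cases hp <;> exact ⟨by omega, by simp only; omega, by omega, by simp only; omega⟩
    apply list2_ext
    · rw [hA, length_pvApply, length_alt]
    · intro r; rw [hA, rlen_pvApply, rlen_alt]
    · intro r c
      rw [hA, gget_pvApply _ _ hb (by decide), gget_alt]
      by_cases hm : (r, c) ∈ cellsOf [(1,0),(2,0),(3,0),(4,0),(1,4),(2,4),(3,4)]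
      · rw [if_pos hm]
        simp only [cellsOf, List.flatMap_cons, List.flatMap_nil, List.append_nil,
          List.cons_append, List.nil_append, List.mem_cons, List.not_mem_nil, or_false,
          Prod.mk.injEq] at hm
        rcases hm with ⟨rfl,rfl⟩|⟨rfl,rfl⟩|⟨rfl,rfl⟩|⟨rfl,rfl⟩|⟨rfl,rfl⟩|⟨rfl,rfl⟩|⟨rfl,rfl⟩|
          ⟨rfl,rfl⟩|⟨rfl,rfl⟩|⟨rfl,rfl⟩|⟨rfl,rfl⟩|⟨rfl,rfl⟩|⟨rfl,rfl⟩|⟨rfl,rfl⟩ <;>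
          rw [if_pos ⟨by decide, by omega, by omega⟩]
      · rw [if_neg hm, if_neg]
        rintro ⟨hcont, -, -⟩
        apply hm
        rw [List.contains_iff_mem,
          show pvCells "outer" = [(0,1),(0,2),(0,3),(0,4),(1,0),(2,0),(3,0),(4,0),
            (1,4),(2,4),(3,4),(4,1),(4,2),(4,3)] from rfl] at hcont
        simp only [List.mem_cons, List.not_mem_nil, or_false, Prod.mk.injEq] at hcont
        rcases hcont with ⟨h1,h2⟩|⟨h1,h2⟩|⟨h1,h2⟩|⟨h1,h2⟩|⟨h1,h2⟩|⟨h1,h2⟩|⟨h1,h2⟩|⟨h1,h2⟩|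
          ⟨h1,h2⟩|⟨h1,h2⟩|⟨h1,h2⟩|⟨h1,h2⟩|⟨h1,h2⟩|⟨h1,h2⟩ <;>
          (norm_cast at h1 h2; subst h1; subst h2; decide)
  · by_cases hi : ring = "inner"
    · subst hi
      obtain ⟨h4, hr1, hr2, hr3⟩ := hpre.2 rfl
      have hA : main_diagonal_flip s "inner" = pvApply [(1,2),(1,3),(2,3)] s := by
        simp [main_diagonal_flip, pvApply, List.foldl]
      have hb : ∀ p ∈ ([(1,2),(1,3),(2,3)] : List (Nat × Nat)),
          p.1 < s.length ∧ p.2 < rlen s p.1 ∧ p.2 < s.length ∧ p.1 < rlen s p.2 := by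
        intro p hp
        fin_cases hp <;> exact ⟨by omega, by simp only; omega, by omega, by simp only; omega⟩
      apply list2_ext
      · rw [hA, length_pvApply, length_alt]
      · intro r; rw [hA, rlen_pvApply, rlen_alt]
      · intro r c
        rw [hA, gget_pvApply _ _ hb (by decide), gget_alt]
        by_cases hm : (r, c) ∈ cellsOf [(1,2),(1,3),(2,3)]
        · rw [if_pos hm]
          simp only [cellsOf, List.flatMap_cons, List.flatMap_nil, List.append_nil,
            List.cons_append, List.nil_append, List.mem_cons, List.not_mem_nil, or_false,
            Prod.mk.injEq] at hm
          rcases hm with ⟨rfl,rfl⟩|⟨rfl,rfl⟩|⟨rfl,rfl⟩|⟨rfl,rfl⟩|⟨rfl,rfl⟩|⟨rfl,rfl⟩ <;>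
            rw [if_pos ⟨by decide, by omega, by omega⟩]
        · rw [if_neg hm, if_neg]
          rintro ⟨hcont, -, -⟩
          apply hm
          rw [List.contains_iff_mem,
            show pvCells "inner" = [(1,2),(2,1),(1,3),(3,1),(2,3),(3,2)] from rfl] at hcont
          simp only [List.mem_cons, List.not_mem_nil, or_false, Prod.mk.injEq] at hcont
          rcases hcont with ⟨h1,h2⟩|⟨h1,h2⟩|⟨h1,h2⟩|⟨h1,h2⟩|⟨h1,h2⟩|⟨h1,h2⟩ <;>
            (norm_cast at h1 h2; subst h1; subst h2; decide)
    · have hA : main_diagonal_flip s ring = s := by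
        rw [main_diagonal_flip, if_neg ho, if_neg hi]
      have hcells : pvCells ring = [] := by
        rw [pvCells, if_neg ho, if_neg hi]
      rw [hA]
      unfold main_diagonal_flip_alt
      rw [hcells]
      simp [PySem.List.map_snd_enumerate]
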